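-- pv_equiv track=rewrite | github.com/Jinwooooo/algorithm-archive | Programmers/sportsFestival_121684.py | solution
-- ===== SOURCE A (Python) =====
-- def solution(ability):
--     width = len(ability[0])
--     height = len(ability)
--
--     def dfs(ability, curr_col, all_score, curr_score, visited_row, width, height):
--         if curr_col >= width:
--             all_score.append(curr_score)
--             return
--
--         for row in range(height):
--             if row not in visited_row:
--                 visited_row.add(row)
--                 curr_score += ability[row][curr_col]
--                 dfs(ability, curr_col + 1, all_score, curr_score, visited_row, width, height)
--                 curr_score -= ability[row][curr_col]
--                 visited_row.remove(row)
--
--     result = []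
--     for row in range(height):
--         visited_row = set()
--         visited_row.add(row)
--         all_score = []
--         dfs(ability, 1, all_score, ability[row][0], visited_row, width, height)
--         result.append(max(all_score))
--
--     return max(result)
-- ===== SOURCE B (Python) =====
-- def solution(ability):
--     h = len(ability)
--     w = len(ability[0])
--     memo = {}
--
--     def best(col, mask):
--         if col >= w:
--             return 0
--         key = (col, mask)
--         if key in memo:
--             return memo[key]
--         res = None
--         for r in range(h):
--             bit = 1 << r
--             if not mask & bit:
--                 sub = best(col + 1, mask | bit)
--                 if sub is not None:
--                     v = ability[r][col] + sub
--                     if res is None or v > res: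
--                         res = v
--         memo[key] = res
--         return res
--
--     return best(0, 0)
-- ===== Notes on version B (the rewrite author's own statement) =====
-- stated objective: faster
-- what changed: A enumerates every injective assignment of rows to columns by backtracking DFS, collecting all leaf sums and taking their max; B is a top-down dynamic program memoized on (column, bitmask of used rows), so each state is solved once.
import Mathlib
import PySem

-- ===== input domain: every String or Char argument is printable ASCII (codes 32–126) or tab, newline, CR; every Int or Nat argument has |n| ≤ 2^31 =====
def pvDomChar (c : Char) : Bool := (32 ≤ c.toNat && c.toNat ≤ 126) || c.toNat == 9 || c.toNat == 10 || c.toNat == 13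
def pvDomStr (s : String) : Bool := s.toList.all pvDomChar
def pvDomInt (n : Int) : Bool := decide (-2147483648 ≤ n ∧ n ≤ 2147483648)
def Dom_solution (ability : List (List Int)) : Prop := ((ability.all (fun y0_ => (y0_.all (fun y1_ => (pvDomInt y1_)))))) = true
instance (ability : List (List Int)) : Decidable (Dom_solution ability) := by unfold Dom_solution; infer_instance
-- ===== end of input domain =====

-- B replaces A's exhaustive DFS over all injective row-to-column assignments by a top-down
-- dynamic program memoized on (column, bitmask of used rows); objective: faster.

-- ===== PORT A =====
-- A's dfs: appends every completed score to all_score; ported as the list of appended scores,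
-- in order.  The Nat fuel only makes the recursion structural (always called with fuel = width - curr_col,
-- and the python test curr_col >= width fires before fuel runs out).
def dfsA (a : List (List Int)) (w h : Int) : Nat → Int → Int → PySem.Set Int → List Int
  | 0, col, curr, _ =>
    if col ≥ w then [curr] else []
  | fuel + 1, col, curr, visited =>
    if col ≥ w then [curr]
    else
      (PySem.List.pyRange 0 h 1).flatMap (fun row =>
        if PySem.Set.contains visited row then []
        else dfsA a w h fuel (col + 1)
               (curr + PySem.List.pyGetD (PySem.List.pyGetD a row []) col 0)
               (PySem.Set.add visited row))

def solution (ability : List (List Int)) : Int :=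
  let w : Int := ((PySem.List.pyGetD ability 0 []).length : Int)
  let h : Int := (ability.length : Int)
  let result : List Int :=
    (PySem.List.pyRange 0 h 1).foldl (fun res row =>
      let allScore := dfsA ability w h (w - 1).toNat 1
        (PySem.List.pyGetD (PySem.List.pyGetD ability row []) 0 0)
        (PySem.Set.add PySem.Set.empty row)
      res ++ [(PySem.List.max? allScore (fun x => x)).getD 0]) []
  (PySem.List.max? result (fun x => x)).getD 0

-- ===== PORT B =====
-- Source B's best(col, mask) with its memo dict; python has no fuel, the Nat fuel (always w - col)
-- only makes the recursion structural; the final .getD 0 realises 'best(0,0) is an int' (true on Pre_).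
def bestB (a : List (List Int)) (h w : Nat) :
    Nat → Nat → Nat → PySem.Dict (Nat × Nat) (Option Int) →
    Option Int × PySem.Dict (Nat × Nat) (Option Int)
  | 0, col, mask, memo =>
    if col ≥ w then (some 0, memo)
    else
      match PySem.Dict.get? memo (col, mask) with
      | some v => (v, memo)
      | none => (none, memo)
  | fuel + 1, col, mask, memo =>
    if col ≥ w then (some 0, memo)
    else
      match PySem.Dict.get? memo (col, mask) with
      | some v => (v, memo)
      | none =>
        let st :=
          (List.range h).foldl (fun (st : Option Int × PySem.Dict (Nat × Nat) (Option Int)) r =>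
            if mask &&& (1 <<< r) == 0 then
              let pr := bestB a h w fuel (col + 1) (mask ||| (1 <<< r)) st.2
              match pr.1 with
              | none => (st.1, pr.2)
              | some s =>
                let v := (a.getD r []).getD col 0 + s
                (match st.1 with
                 | none => some v
                 | some b => if v > b then some v else st.1, pr.2)
            else st) ((none : Option Int), memo)
        (st.1, PySem.Dict.insert st.2 (col, mask) st.1)

def solution_alt (ability : List (List Int)) : Int :=
  let h := ability.length
  let w := (PySem.List.pyGetD ability 0 []).length
  ((bestB ability h w w 0 0 PySem.Dict.empty).1).getD 0

-- ===== PRECONDITION & SPEC =====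
-- Pre_ excludes exactly the inputs where the python A raises: the empty list and an empty first
-- row (IndexError on ability[row][0]), more columns than rows (max() of an empty list, ValueError),
-- and a row shorter than the first row (IndexError on ability[row][curr_col]).
def Pre_solution (ability : List (List Int)) : Prop :=
  ability ≠ [] ∧
  1 ≤ (ability.headD []).length ∧
  (ability.headD []).length ≤ ability.length ∧
  ∀ row ∈ ability, (ability.headD []).length ≤ row.length
instance (ability : List (List Int)) : Decidable (Pre_solution ability) := by
  unfold Pre_solution; infer_instance
def pvWitness_solution : List (List Int) := [[1, 2], [3, 4]]

def Spec_solution (ability : List (List Int)) (out : Int) : Prop := out = solution_alt ability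
instance (ability : List (List Int)) (out : Int) : Decidable (Spec_solution ability out) := by
  unfold Spec_solution; infer_instance

-- ===== CLAIM (what is proved, stated in full; the proofs are below) =====
def Claim_equal_solution : Prop := ∀ (ability : List (List Int)), Dom_solution ability → Pre_solution ability → Spec_solution ability (solution ability)

-- ===== LEMMAS AND PROOFS =====

-- entry a[r][c] as both programs read it (default never hit on Pre_)
def aij (a : List (List Int)) (r c : Nat) : Int := (a.getD r []).getD c 0

-- the common mathematical value: best completion of columns (w - fuel)..(w-1) given used-row mask
def P (a : List (List Int)) (h w : Nat) : Nat → Nat → Option Int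
  | 0, _ => some 0
  | k + 1, mask =>
    (List.range h).foldl (fun res r =>
      if mask &&& (1 <<< r) == 0 then
        match P a h w k (mask ||| (1 <<< r)) with
        | none => res
        | some s =>
          let v := aij a r (w - k - 1) + s
          match res with
          | none => some v
          | some b => if v > b then some v else res
      else res) none

def stepP (a : List (List Int)) (h w : Nat) (k : Nat) (mask : Nat) : Option Int → Nat → Option Int :=
  fun res r =>
    if mask &&& (1 <<< r) == 0 then
      match P a h w k (mask ||| (1 <<< r)) with
      | none => res
      | some s =>
        let v := aij a r (w - k - 1) + s
        match res with
        | none => some v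
        | some b => if v > b then some v else res
    else res

lemma P_succ (a : List (List Int)) (h w k mask : Nat) :
    P a h w (k + 1) mask = (List.range h).foldl (stepP a h w k mask) none := rfl

def omerge (b o : Option Int) : Option Int :=
  match o with
  | none => b
  | some v =>
    match b with
    | none => some v
    | some x => some (max x v)

lemma if_max (b v : Int) : (if v > b then some v else some b) = some (max b v) := by
  split <;> [skip; skip] <;> congr 1 <;> omega

lemma omerge_assoc (p q r : Option Int) : omerge (omerge p q) r = omerge p (omerge q r) := by
  cases p <;> cases q <;> cases r <;> simp [omerge, max_assoc]

lemma foldl_omerge_some (t : List Int) : ∀ x : Int,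
    t.foldl (fun o y => omerge o (some y)) (some x) = some (t.foldl max x) := by
  induction t with
  | nil => intro x; rfl
  | cons y t ih => intro x; simp only [List.foldl_cons, omerge]; exact ih (max x y)

lemma max?_eq_foldl (xs : List Int) :
    PySem.List.max? xs (fun x => x) = xs.foldl (fun o y => omerge o (some y)) none := by
  cases xs with
  | nil => simp [PySem.List.max?_eq_none_iff]
  | cons x t => rw [PySem.List.max?_id_cons]; simp only [List.foldl_cons, omerge]
                exact (foldl_omerge_some t x).symm

lemma foldl_omerge_resume (xs : List Int) : ∀ b : Option Int,
    xs.foldl (fun o y => omerge o (some y)) b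
      = omerge b (xs.foldl (fun o y => omerge o (some y)) none) := by
  induction xs with
  | nil => intro b; cases b <;> rfl
  | cons y t ih =>
    intro b
    simp only [List.foldl_cons]
    rw [ih (omerge b (some y)), ih (omerge none (some y))]
    rw [omerge_assoc]
    rfl

lemma and_or_pow (mask r r' : Nat) :
    ((mask ||| 1 <<< r) &&& (1 <<< r') = 0) ↔ (mask &&& (1 <<< r') = 0 ∧ r ≠ r') := by
  rw [Nat.one_shiftLeft, Nat.one_shiftLeft, Nat.and_two_pow, Nat.and_two_pow]
  simp [Nat.testBit_or, Nat.testBit_two_pow]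

lemma dfs_max (a : List (List Int)) (h w : Nat) :
    ∀ (fuel : Nat) (col curr : Int) (visited : PySem.Set Int) (mask : Nat),
      fuel ≤ w → col = (w : Int) - (fuel : Int) →
      (∀ r : Nat, r < h →
        (PySem.Set.contains visited (r : Int) = true ↔ ¬ (mask &&& (1 <<< r) = 0))) →
      PySem.List.max? (dfsA a (w : Int) (h : Int) fuel col curr visited) (fun x => x)
        = (P a h w fuel mask).map (fun v => curr + v) := by
  intro fuel
  induction fuel with
  | zero =>
    intro col curr visited mask hfw hcol hrel
    have hge : col ≥ (w : Int) := by omega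
    simp only [dfsA, if_pos hge]
    rw [PySem.List.max?_id_cons]
    simp [P]
  | succ f ih =>
    intro col curr visited mask hfw hcol hrel
    have hlt : ¬ col ≥ (w : Int) := by
      omega
    simp only [dfsA, if_neg hlt]
    rw [PySem.List.pyRange_zero_natCast, List.flatMap_map, max?_eq_foldl]
    have key : ∀ rs : List Nat, (∀ r ∈ rs, r < h) → ∀ B : Option Int,
        List.foldl (fun o y => omerge o (some y))
          (B.map (fun v => curr + v))
          (rs.flatMap (fun r =>
            if PySem.Set.contains visited ((r : Nat) : Int) then []
            else dfsA a (w : Int) (h : Int) f (col + 1)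
                   (curr + PySem.List.pyGetD (PySem.List.pyGetD a ((r : Nat) : Int) []) col 0)
                   (PySem.Set.add visited ((r : Nat) : Int))))
        = (rs.foldl (stepP a h w f mask) B).map (fun v => curr + v) := by
      intro rs
      induction rs with
      | nil => intro _ B; rfl
      | cons r rs ihrs =>
        intro hmem B
        have hrh : r < h := hmem r (by simp)
        simp only [List.flatMap_cons, List.foldl_append, List.foldl_cons]
        have hA : PySem.List.pyGetD (PySem.List.pyGetD a ((r : Nat) : Int) []) col 0
            = aij a r (w - f - 1) := by
          have hcolnat : col = ((w - f - 1 : Nat) : Int) := by push_cast; omega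
          rw [PySem.List.pyGetD_natCast, hcolnat, PySem.List.pyGetD_natCast]
          rfl
        have hstep : List.foldl (fun o y => omerge o (some y)) (B.map (fun v => curr + v))
            (if PySem.Set.contains visited ((r : Nat) : Int) then []
             else dfsA a (w : Int) (h : Int) f (col + 1)
                    (curr + PySem.List.pyGetD (PySem.List.pyGetD a ((r : Nat) : Int) []) col 0)
                    (PySem.Set.add visited ((r : Nat) : Int)))
            = ((stepP a h w f mask) B r).map (fun v => curr + v) := by
          by_cases hc : mask &&& (1 <<< r) = 0
          · have hcf : PySem.Set.contains visited ((r : Nat) : Int) = false := by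
              cases hcv : PySem.Set.contains visited ((r : Nat) : Int) with
              | false => rfl
              | true => exact absurd ((hrel r hrh).1 hcv) (by simp [hc])
            rw [hcf]
            simp only [Bool.false_eq_true, if_false]
            rw [foldl_omerge_resume, ← max?_eq_foldl]
            rw [ih (col + 1) (curr + PySem.List.pyGetD (PySem.List.pyGetD a ((r : Nat) : Int) []) col 0)
                  (PySem.Set.add visited ((r : Nat) : Int)) (mask ||| 1 <<< r)
                  (by omega) (by push_cast at hcol ⊢; omega) ?relnew]
            case relnew =>
              intro r' hr'
              rw [PySem.Set.contains_iff, PySem.Set.mem_add, and_or_pow]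
              rw [← PySem.Set.contains_iff]
              constructor
              · rintro (hin | heq)
                · exact fun hz => ((hrel r' hr').1 hin) hz.1
                · have : r = r' := by exact_mod_cast heq.symm
                  exact fun hz => hz.2 this
              · intro hz
                by_cases hm : mask &&& (1 <<< r') = 0
                · right
                  have hrr : r = r' := by
                    by_contra hne
                    exact hz ⟨hm, hne⟩
                  exact_mod_cast hrr.symm
                · exact Or.inl ((hrel r' hr').2 hm)
            rw [hA]
            have hcbeq : (mask &&& 1 <<< r == 0) = true := by simpa using hc
            simp only [stepP, hcbeq, if_true]
            cases hP : P a h w f (mask ||| 1 <<< r) with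
            | none => simp [omerge]
            | some s =>
              cases B with
              | none => simp [omerge, add_assoc]
              | some b =>
                simp only [Option.map_some, omerge]
                split_ifs with h1 <;> (congr 1; beta_reduce; rw [max_def]; split_ifs <;> omega)
          · have hct : PySem.Set.contains visited ((r : Nat) : Int) = true := (hrel r hrh).2 hc
            rw [hct]
            simp only [if_true, List.foldl_nil]
            have hcbeq : (mask &&& 1 <<< r == 0) = false := by simpa using hc
            simp only [stepP, hcbeq, Bool.false_eq_true, if_false]
        rw [hstep]
        exact ihrs (fun x hx => hmem x (by simp [hx])) (stepP a h w f mask B r)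
    have hkey := key (List.range h) (fun r hr => List.mem_range.mp hr) none
    simpa [P_succ] using hkey

def InvM (a : List (List Int)) (h w : Nat) (memo : PySem.Dict (Nat × Nat) (Option Int)) : Prop :=
  ∀ c m v, PySem.Dict.get? memo (c, m) = some v → v = P a h w (w - c) m

lemma bestB_eq (a : List (List Int)) (h w : Nat) :
    ∀ (fuel : Nat) (col mask : Nat) (memo : PySem.Dict (Nat × Nat) (Option Int)),
      InvM a h w memo → fuel = w - col →
      (bestB a h w fuel col mask memo).1 = P a h w fuel mask ∧
        InvM a h w (bestB a h w fuel col mask memo).2 := by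
  intro fuel
  induction fuel with
  | zero =>
    intro col mask memo hinv hf
    have hcw : col ≥ w := by omega
    simp only [bestB, if_pos hcw]
    exact ⟨rfl, hinv⟩
  | succ f ihf =>
    intro col mask memo hinv hf
    have hclt : col < w := by omega
    simp only [bestB, if_neg (by omega : ¬ col ≥ w)]
    cases hget : PySem.Dict.get? memo (col, mask) with
    | some v =>
      simp only [hget]
      refine ⟨?_, hinv⟩
      rw [hf]
      exact hinv col mask v hget
    | none =>
      simp only [hget]
      have hfcol : f = w - (col + 1) := by omega
      have hcolval : col = w - f - 1 := by omega
      have inner : ∀ (rs : List Nat) (res : Option Int)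
          (m0 : PySem.Dict (Nat × Nat) (Option Int)), InvM a h w m0 →
          (rs.foldl (fun (st : Option Int × PySem.Dict (Nat × Nat) (Option Int)) r =>
            if mask &&& (1 <<< r) == 0 then
              let pr := bestB a h w f (col + 1) (mask ||| (1 <<< r)) st.2
              match pr.1 with
              | none => (st.1, pr.2)
              | some s =>
                let v := (a.getD r []).getD col 0 + s
                (match st.1 with
                 | none => some v
                 | some b => if v > b then some v else st.1, pr.2)
            else st) (res, m0)).1 = rs.foldl (stepP a h w f mask) res ∧
          InvM a h w ((rs.foldl (fun (st : Option Int × PySem.Dict (Nat × Nat) (Option Int)) r =>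
            if mask &&& (1 <<< r) == 0 then
              let pr := bestB a h w f (col + 1) (mask ||| (1 <<< r)) st.2
              match pr.1 with
              | none => (st.1, pr.2)
              | some s =>
                let v := (a.getD r []).getD col 0 + s
                (match st.1 with
                 | none => some v
                 | some b => if v > b then some v else st.1, pr.2)
            else st) (res, m0)).2) := by
        intro rs
        induction rs with
        | nil => intro res m0 h0; exact ⟨rfl, h0⟩
        | cons r rs ihrs =>
          intro res m0 h0
          simp only [List.foldl_cons]
          by_cases hc : mask &&& (1 <<< r) = 0
          · have hcbeq : (mask &&& 1 <<< r == 0) = true := by simpa using hc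
            simp only [hcbeq, if_true]
            obtain ⟨hpr1, hpr2⟩ := ihf (col + 1) (mask ||| (1 <<< r)) m0 h0 hfcol
            rw [hpr1]
            have hstep : stepP a h w f mask res r
                = match P a h w f (mask ||| (1 <<< r)) with
                  | none => res
                  | some s =>
                    let v := (a.getD r []).getD col 0 + s
                    match res with
                    | none => some v
                    | some b => if v > b then some v else res := by
              simp only [stepP, hcbeq, if_true, aij, hcolval]
            cases hP : P a h w f (mask ||| (1 <<< r)) with
            | none =>
              rw [hstep, hP]
              exact ihrs res _ hpr2
            | some sv =>
              rw [hstep, hP]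
              exact ihrs _ _ hpr2
          · have hcbeq : (mask &&& 1 <<< r == 0) = false := by simpa using hc
            simp only [hcbeq, Bool.false_eq_true, if_false]
            have hstep : stepP a h w f mask res r = res := by
              simp only [stepP, hcbeq, Bool.false_eq_true, if_false]
            rw [hstep]
            exact ihrs res m0 h0
      obtain ⟨h1, h2⟩ := inner (List.range h) none memo hinv
      constructor
      · simpa [P_succ] using h1
      · intro c m v hgv
        by_cases hk : (c, m) = (col, mask)
        · obtain ⟨rfl, rfl⟩ := Prod.ext_iff.mp hk
          rw [PySem.Dict.get?_insert_self] at hgv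
          have hwc : w - c = f + 1 := by omega
          rw [hwc, ← Option.some_inj.mp hgv]
          simpa [P_succ] using h1
        · rw [PySem.Dict.get?_insert_of_ne _ _ hk] at hgv
          exact h2 c m v hgv

lemma stepP_preserves (a : List (List Int)) (h w k mask : Nat) :
    ∀ (res : Option Int) (r : Nat), res.isSome → (stepP a h w k mask res r).isSome := by
  intro res r hres
  unfold stepP
  cases hif : (mask &&& 1 <<< r == 0) with
  | false => simpa [hif] using hres
  | true =>
    simp only [hif, if_true]
    cases P a h w k (mask ||| 1 <<< r) with
    | none => exact hres
    | some s =>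
      cases res with
      | none => simp
      | some b => dsimp only; split_ifs <;> simp

lemma foldP_preserves (a : List (List Int)) (h w k mask : Nat) :
    ∀ (rs : List Nat) (res : Option Int), res.isSome →
      (rs.foldl (stepP a h w k mask) res).isSome := by
  intro rs
  induction rs with
  | nil => intro res hres; simpa using hres
  | cons y t ih =>
    intro res hres
    simpa using ih _ (stepP_preserves a h w k mask res y hres)

lemma foldP_hits (a : List (List Int)) (h w k mask : Nat) :
    ∀ (rs : List Nat) (res : Option Int) (r : Nat), r ∈ rs →
      mask &&& 1 <<< r = 0 → (P a h w k (mask ||| 1 <<< r)).isSome →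
      (rs.foldl (stepP a h w k mask) res).isSome := by
  intro rs
  induction rs with
  | nil => intro res r hmem; exact absurd hmem (List.not_mem_nil)
  | cons y t ih =>
    intro res r hmem hfree hsome
    rcases List.mem_cons.mp hmem with heq | hmem'
    · subst heq
      have hstep : (stepP a h w k mask res r).isSome := by
        unfold stepP
        have hcbeq : (mask &&& 1 <<< r == 0) = true := by simpa using hfree
        simp only [hcbeq, if_true]
        cases hP : P a h w k (mask ||| 1 <<< r) with
        | none => rw [hP] at hsome; simp at hsome
        | some s =>
          cases res with
          | none => simp
          | some b => dsimp only; split_ifs <;> simp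
      simpa using foldP_preserves a h w k mask t _ hstep
    · simpa using ih (stepP a h w k mask res y) r hmem' hfree hsome

lemma freeCount_or (h mask r : Nat) (hr : r < h) (hfree : mask &&& (1 <<< r) = 0) :
    ((List.range h).filter (fun x => (mask ||| 1 <<< r) &&& (1 <<< x) == 0)).length + 1
      = ((List.range h).filter (fun x => mask &&& (1 <<< x) == 0)).length := by
  have hcong : (List.range h).filter (fun x => (mask ||| 1 <<< r) &&& (1 <<< x) == 0)
      = ((List.range h).filter (fun x => mask &&& (1 <<< x) == 0)).filter (fun x => !(x == r)) := by
    rw [List.filter_filter]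
    apply List.filter_congr
    intro x hx
    by_cases hxr : x = r
    · subst hxr
      have hz : ¬ ((mask ||| 1 <<< x) &&& (1 <<< x) = 0) :=
        fun hz => ((and_or_pow mask x x).mp hz).2 rfl
      have h1 : ((mask ||| 1 <<< x) &&& (1 <<< x) == 0) = false := by simpa using hz
      rw [h1]
      simp
    · by_cases hmx : mask &&& 1 <<< x = 0
      · have hz : (mask ||| 1 <<< r) &&& (1 <<< x) = 0 :=
          (and_or_pow mask r x).mpr ⟨hmx, fun he => hxr he.symm⟩
        have h1 : ((mask ||| 1 <<< r) &&& (1 <<< x) == 0) = true := by simpa using hz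
        have h2 : (mask &&& (1 <<< x) == 0) = true := by simpa using hmx
        have h3 : (x == r) = false := by simpa using hxr
        rw [h1, h2, h3]
        rfl
      · have hz : ¬ ((mask ||| 1 <<< r) &&& (1 <<< x) = 0) :=
          fun hz => hmx ((and_or_pow mask r x).mp hz).1
        have h1 : ((mask ||| 1 <<< r) &&& (1 <<< x) == 0) = false := by simpa using hz
        have h2 : (mask &&& (1 <<< x) == 0) = false := by simpa using hmx
        rw [h1, h2, Bool.and_false]
  have hnd : ((List.range h).filter (fun x => mask &&& (1 <<< x) == 0)).Nodup :=
    (List.nodup_range).filter _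
  have hrmem : r ∈ (List.range h).filter (fun x => mask &&& (1 <<< x) == 0) :=
    List.mem_filter.mpr ⟨List.mem_range.mpr hr, by simpa using hfree⟩
  have herase : ((List.range h).filter (fun x => mask &&& (1 <<< x) == 0)).filter (fun x => !(x == r))
      = ((List.range h).filter (fun x => mask &&& (1 <<< x) == 0)).erase r := by
    rw [List.Nodup.erase_eq_filter hnd]
    apply List.filter_congr
    intro x hx
    cases hxr : x == r
    · have hne : x ≠ r := by simpa using hxr
      simp [hxr, hne]
    · have heq : x = r := by simpa using hxr
      simp [hxr, heq]
  rw [hcong, herase, List.length_erase_of_mem hrmem]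
  have : 0 < ((List.range h).filter (fun x => mask &&& (1 <<< x) == 0)).length :=
    List.length_pos_of_mem hrmem
  omega

lemma P_isSome (a : List (List Int)) (h w : Nat) :
    ∀ (fuel mask : Nat),
      fuel ≤ ((List.range h).filter (fun x => mask &&& (1 <<< x) == 0)).length →
      (P a h w fuel mask).isSome := by
  intro fuel
  induction fuel with
  | zero => intro mask _; simp [P]
  | succ f ihf =>
    intro mask hlen
    rw [P_succ]
    have hpos : 0 < ((List.range h).filter (fun x => mask &&& (1 <<< x) == 0)).length := by omega
    obtain ⟨r, hr⟩ := List.exists_mem_of_length_pos hpos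
    have hrmem := List.mem_filter.mp hr
    have hrh : r < h := List.mem_range.mp hrmem.1
    have hfree : mask &&& 1 <<< r = 0 := by simpa using hrmem.2
    have hsub : (P a h w f (mask ||| 1 <<< r)).isSome := by
      apply ihf
      have hcount := freeCount_or h mask r hrh hfree
      omega
    exact foldP_hits a h w f mask (List.range h) none r (List.mem_range.mpr hrh) hfree hsub

-- ===== VERDICT (by name: the statement is the Claim_ definition above) =====
lemma headD_getD (a : List (List Int)) : PySem.List.pyGetD a 0 [] = a.headD [] := by
  have h0 : (0 : Int) = ((0 : Nat) : Int) := rfl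
  rw [h0, PySem.List.pyGetD_natCast]
  cases a <;> rfl

lemma getD0_aij (a : List (List Int)) (r : Nat) :
    PySem.List.pyGetD (PySem.List.pyGetD a ((r : Nat) : Int) []) 0 0 = aij a r 0 := by
  rw [PySem.List.pyGetD_natCast]
  have h0 : (0 : Int) = ((0 : Nat) : Int) := rfl
  rw [h0, PySem.List.pyGetD_natCast]
  rfl

lemma count_single (H r : Nat) (hr : r < H) :
    ((List.range H).filter (fun x => (1 <<< r) &&& (1 <<< x) == 0)).length = H - 1 := by
  have h := freeCount_or H 0 r hr (by simp)
  simp only [Nat.zero_or, Nat.zero_and, beq_self_eq_true, List.filter_true,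
    List.length_range] at h
  omega

theorem solution_spec : Claim_equal_solution := by
  intro a _hdom hpre
  obtain ⟨hne, hw1, hwh, _hrows⟩ := hpre
  unfold Spec_solution
  obtain ⟨W', hW'⟩ : ∃ W', (a.headD []).length = W' + 1 := ⟨(a.headD []).length - 1, by omega⟩
  have hEmpty : InvM a a.length (a.headD []).length PySem.Dict.empty := by
    intro c m v hg
    rw [PySem.Dict.get?_empty] at hg
    exact absurd hg (by simp)
  have hB := bestB_eq a a.length (a.headD []).length ((a.headD []).length) 0 0
    PySem.Dict.empty hEmpty (by omega)
  have hBeq : solution_alt a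
      = (P a a.length (a.headD []).length ((a.headD []).length) 0).getD 0 := by
    unfold solution_alt
    simp only [headD_getD]
    rw [hB.1]
  have hAeq : solution a
      = (P a a.length (a.headD []).length ((a.headD []).length) 0).getD 0 := by
    unfold solution
    simp only [headD_getD]
    rw [PySem.List.pyRange_zero_natCast a.length, List.foldl_map,
      PySem.List.foldl_append_singleton_eq_map, List.nil_append, max?_eq_foldl, List.foldl_map]
    congr 1
    rw [hW', P_succ]
    apply PySem.List.foldl_congr_mem
    intro o r hr
    have hrH : r < a.length := List.mem_range.mp hr
    have hfuel : ((((W' + 1 : Nat)) : Int) - 1).toNat = W' := by omega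
    rw [hfuel, getD0_aij]
    have hrel : ∀ r' : Nat, r' < a.length →
        (PySem.Set.contains (PySem.Set.add PySem.Set.empty ((r : Nat) : Int)) ((r' : Nat) : Int) = true
          ↔ ¬ ((1 <<< r) &&& (1 <<< r') = 0)) := by
      intro r' _
      rw [PySem.Set.contains_iff, PySem.Set.mem_add]
      constructor
      · rintro (hin | heq)
        · exact absurd hin (List.not_mem_nil)
        · have : r' = r := by exact_mod_cast heq
          subst this
          intro hz
          have := (and_or_pow 0 r' r').mp (by simpa [Nat.zero_or] using hz)
          exact this.2 rfl
      · intro hz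
        right
        have : r = r' := by
          by_contra hne'
          exact hz (by simpa [Nat.zero_or] using (and_or_pow 0 r r').mpr ⟨by simp, hne'⟩)
        exact_mod_cast this.symm
    rw [dfs_max a a.length (W' + 1) W' 1 (aij a r 0)
      (PySem.Set.add PySem.Set.empty ((r : Nat) : Int)) (1 <<< r)
      (by omega) (by push_cast; omega) hrel]
    have hsome : (P a a.length (W' + 1) W' (1 <<< r)).isSome := by
      apply P_isSome
      rw [count_single a.length r hrH]
      omega
    obtain ⟨p, hp⟩ := Option.isSome_iff_exists.mp hsome
    rw [hp]
    simp only [Option.map_some, Option.getD_some]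
    unfold stepP
    have hc0 : ((0 : Nat) &&& 1 <<< r == 0) = true := by simp
    simp only [hc0, if_true, Nat.zero_or, hp]
    have hcol : W' + 1 - W' - 1 = 0 := by omega
    rw [hcol]
    cases o with
    | none => rfl
    | some b =>
      simp only [omerge]
      rw [if_max]
  rw [hAeq, hBeq]
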